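-- pv_equiv track=rewrite | github.com/symprofold/Domain_Separator | bib/domain_property.py | get_num_betasheet
-- ===== SOURCE A (Python) =====
-- def get_num_betasheet(dom_range, sstruct_nodes, max_strands=1000):
--     '''
--     Get number of beta sheets in a given residue range.
--     '''
--     betasheet_num = 0
--     betasheet_ids = []
--
--     for r in range(dom_range[0], dom_range[1]+1):
--         for i,betasheet in enumerate(sstruct_nodes):
--             if r in betasheet[0]:
--                 if i not in betasheet_ids:
--                     if len(betasheet[1]) <= max_strands:
--                         betasheet_ids.append(i)
--
--     betasheet_num = len(betasheet_ids)
--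
--     return betasheet_num
-- ===== SOURCE B (Python) =====
-- def get_num_betasheet(dom_range, sstruct_nodes, max_strands=1000):
--     '''
--     Get number of beta sheets in a given residue range.
--     '''
--     lo, hi = dom_range[0], dom_range[1]
--     return sum(1 for residues, strands in sstruct_nodes
--                if len(strands) <= max_strands
--                and any(lo <= x <= hi for x in residues))
-- ===== Notes on version B (the rewrite author's own statement) =====
-- stated objective: alternative
-- what changed: Replaced the per-residue rescan of all sheets (range loop x enumerate loop x list membership, deduplicated via an id list) by a single pass over the sheets testing each sheet's residue list for overlap with the range once.
import Mathlib
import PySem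

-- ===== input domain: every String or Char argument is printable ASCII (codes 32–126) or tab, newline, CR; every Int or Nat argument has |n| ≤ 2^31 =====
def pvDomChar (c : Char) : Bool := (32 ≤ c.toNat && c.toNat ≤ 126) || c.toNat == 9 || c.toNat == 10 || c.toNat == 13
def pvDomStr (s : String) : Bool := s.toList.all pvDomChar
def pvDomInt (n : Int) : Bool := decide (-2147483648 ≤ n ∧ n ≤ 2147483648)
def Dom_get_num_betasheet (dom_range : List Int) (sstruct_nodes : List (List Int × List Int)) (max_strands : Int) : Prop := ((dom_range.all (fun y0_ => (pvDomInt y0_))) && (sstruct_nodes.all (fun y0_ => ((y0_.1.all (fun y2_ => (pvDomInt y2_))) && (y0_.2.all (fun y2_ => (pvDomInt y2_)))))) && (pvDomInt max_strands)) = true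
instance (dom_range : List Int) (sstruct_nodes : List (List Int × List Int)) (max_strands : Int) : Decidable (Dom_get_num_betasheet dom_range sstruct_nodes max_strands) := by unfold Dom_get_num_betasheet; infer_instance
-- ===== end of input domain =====

-- B replaces the per-residue rescan of all sheets by one pass over the sheets,
-- testing each sheet's residue list for overlap with [dom_range[0], dom_range[1]] once (objective: alternative).

-- ===== PORT A =====
-- inner-loop body of A: for one residue r and one enumerated sheet p, maybe record p's index
def pvStepA (max_strands : Int) (r : Int) (ids : List Int) (p : Int × (List Int × List Int)) : List Int :=
  if r ∈ p.2.1 then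
    if p.1 ∉ ids then
      if (p.2.2.length : Int) ≤ max_strands then ids ++ [p.1] else ids
    else ids
  else ids

def get_num_betasheet (dom_range : List Int) (sstruct_nodes : List (List Int × List Int)) (max_strands : Int) : Int :=
  match PySem.List.pyGet? dom_range 0, PySem.List.pyGet? dom_range 1 with
  | some lo, some hi =>
      let betasheet_ids : List Int :=
        (PySem.List.pyRange lo (hi + 1) 1).foldl
          (fun ids r => (PySem.List.enumerate sstruct_nodes 0).foldl (pvStepA max_strands r) ids) []
      (betasheet_ids.length : Int)
  | _, _ => 0

-- ===== PORT B =====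
-- B's per-sheet test: strand limit and overlap of the residue list with [lo, hi]
def pvKeep (lo hi max_strands : Int) (p : List Int × List Int) : Bool :=
  decide ((p.2.length : Int) ≤ max_strands) && p.1.any (fun x => decide (lo ≤ x) && decide (x ≤ hi))

def get_num_betasheet_alt (dom_range : List Int) (sstruct_nodes : List (List Int × List Int)) (max_strands : Int) : Int :=
  (((PySem.List.pyGet? dom_range 0).bind fun lo =>
      (PySem.List.pyGet? dom_range 1).map fun hi =>
        ((sstruct_nodes.countP (pvKeep lo hi max_strands) : Nat) : Int))).getD 0

-- ===== PRECONDITION & SPEC =====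
-- Pre_: dom_range needs at least two elements, else Python's dom_range[0]/dom_range[1] raises IndexError.
def Pre_get_num_betasheet (dom_range : List Int) (sstruct_nodes : List (List Int × List Int)) (max_strands : Int) : Prop :=
  2 ≤ dom_range.length
instance (dom_range : List Int) (sstruct_nodes : List (List Int × List Int)) (max_strands : Int) : Decidable (Pre_get_num_betasheet dom_range sstruct_nodes max_strands) := by unfold Pre_get_num_betasheet; infer_instance

def pvWitness_get_num_betasheet : List Int × (List (List Int × List Int)) × Int :=
  ([1, 5], [([1, 2, 3], [4, 4]), ([9], [])], 1000)

def Spec_get_num_betasheet (dom_range : List Int) (sstruct_nodes : List (List Int × List Int)) (max_strands : Int) (out : Int) : Prop := out = get_num_betasheet_alt dom_range sstruct_nodes max_strands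
instance (dom_range : List Int) (sstruct_nodes : List (List Int × List Int)) (max_strands : Int) (out : Int) : Decidable (Spec_get_num_betasheet dom_range sstruct_nodes max_strands out) := by unfold Spec_get_num_betasheet; infer_instance

-- ===== CLAIM (what is proved, stated in full; the proofs are below) =====
def Claim_equal_get_num_betasheet : Prop := ∀ (dom_range : List Int) (sstruct_nodes : List (List Int × List Int)) (max_strands : Int), Dom_get_num_betasheet dom_range sstruct_nodes max_strands → Pre_get_num_betasheet dom_range sstruct_nodes max_strands → Spec_get_num_betasheet dom_range sstruct_nodes max_strands (get_num_betasheet dom_range sstruct_nodes max_strands)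

-- ===== LEMMAS AND PROOFS =====

theorem mem_foldl_stepA (ms r x : Int) (l : List (Int × (List Int × List Int))) (ids : List Int) :
    x ∈ l.foldl (pvStepA ms r) ids ↔
      x ∈ ids ∨ ∃ p ∈ l, p.1 = x ∧ r ∈ p.2.1 ∧ (p.2.2.length : Int) ≤ ms := by
  induction l generalizing ids with
  | nil => simp
  | cons q t ih =>
    rw [List.foldl_cons, ih]
    have hstep : x ∈ pvStepA ms r ids q ↔
        x ∈ ids ∨ (q.1 = x ∧ r ∈ q.2.1 ∧ (q.2.2.length : Int) ≤ ms) := by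
      unfold pvStepA
      split_ifs with h1 h2 h3 <;> simp_all <;> aesop
    rw [hstep]
    simp only [List.mem_cons]
    constructor
    · rintro ((h | h) | ⟨p, hp, h⟩)
      exacts [Or.inl h, Or.inr ⟨q, Or.inl rfl, h⟩, Or.inr ⟨p, Or.inr hp, h⟩]
    · rintro (h | ⟨p, (rfl | hp), h⟩)
      exacts [Or.inl (Or.inl h), Or.inl (Or.inr h), Or.inr ⟨p, hp, h⟩]

theorem nodup_foldl_stepA (ms r : Int) (l : List (Int × (List Int × List Int))) (ids : List Int)
    (h : ids.Nodup) : (l.foldl (pvStepA ms r) ids).Nodup := by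
  induction l generalizing ids with
  | nil => simpa
  | cons p t ih =>
    rw [List.foldl_cons]
    apply ih
    unfold pvStepA
    split_ifs with h1 h2 h3 <;> simp_all [List.nodup_append] <;>
      exact fun a ha he => h2 (he ▸ ha)

theorem mem_foldl_outer (ms x : Int) (sn : List (List Int × List Int)) (rs : List Int) (ids : List Int) :
    x ∈ rs.foldl (fun ids r => (PySem.List.enumerate sn 0).foldl (pvStepA ms r) ids) ids ↔
      x ∈ ids ∨ ∃ r ∈ rs, ∃ p ∈ PySem.List.enumerate sn 0, p.1 = x ∧ r ∈ p.2.1 ∧ (p.2.2.length : Int) ≤ ms := by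
  induction rs generalizing ids with
  | nil => simp
  | cons r t ih =>
    rw [List.foldl_cons, ih]
    rw [mem_foldl_stepA]
    aesop

theorem nodup_foldl_outer (ms : Int) (sn : List (List Int × List Int)) (rs : List Int) (ids : List Int)
    (h : ids.Nodup) :
    (rs.foldl (fun ids r => (PySem.List.enumerate sn 0).foldl (pvStepA ms r) ids) ids).Nodup := by
  induction rs generalizing ids with
  | nil => simpa
  | cons r t ih => exact ih _ (nodup_foldl_stepA ms r _ ids h)

theorem count_eq (lo hi ms : Int) (sn : List (List Int × List Int)) :
    (((PySem.List.pyRange lo (hi + 1) 1).foldl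
        (fun ids r => (PySem.List.enumerate sn 0).foldl (pvStepA ms r) ids) []).length : Int)
      = ((sn.countP (pvKeep lo hi ms) : Nat) : Int) := by
  set ids := (PySem.List.pyRange lo (hi + 1) 1).foldl
      (fun ids r => (PySem.List.enumerate sn 0).foldl (pvStepA ms r) ids) [] with hids
  set c := ((PySem.List.enumerate sn 0).filter (fun p => pvKeep lo hi ms p.2)).map (·.1) with hc
  have hnd : ids.Nodup := nodup_foldl_outer ms sn _ [] (by simp)
  have hcnd : c.Nodup := by
    have h1 : ((PySem.List.enumerate sn 0).filter (fun p => pvKeep lo hi ms p.2)).Pairwise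
        (fun p q => p.1 < q.1) := (PySem.List.pairwise_lt_enumerate sn 0).filter _
    have h2 : c.Pairwise (· < ·) := by
      rw [hc, List.pairwise_map]; exact h1
    exact h2.imp ne_of_lt
  have hmem : ∀ x : Int, x ∈ ids ↔ x ∈ c := by
    intro x
    rw [hids, mem_foldl_outer, hc]
    simp only [List.mem_map, List.mem_filter, List.not_mem_nil, false_or]
    constructor
    · rintro ⟨r, hr, p, hp, h1, h2, h3⟩
      refine ⟨p, ⟨hp, ?_⟩, h1⟩
      rw [PySem.List.mem_pyRange_one] at hr
      simp only [pvKeep, Bool.and_eq_true, decide_eq_true_eq, List.any_eq_true]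
      exact ⟨h3, r, h2, hr.1, by omega⟩
    · rintro ⟨p, ⟨hp, hk⟩, h1⟩
      simp only [pvKeep, Bool.and_eq_true, decide_eq_true_eq, List.any_eq_true] at hk
      obtain ⟨h3, r, h2, hr1, hr2⟩ := hk
      exact ⟨r, PySem.List.mem_pyRange_one.mpr ⟨hr1, by omega⟩, p, hp, h1, h2, h3⟩
  have hlen : ids.length = c.length := by
    rw [← List.toFinset_card_of_nodup hnd, ← List.toFinset_card_of_nodup hcnd]
    congr 1
    ext x
    simp only [List.mem_toFinset]
    exact hmem x
  have hclen : c.length = sn.countP (pvKeep lo hi ms) := by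
    rw [hc, List.length_map, ← List.countP_eq_length_filter]
    have h : List.countP (fun p : Int × (List Int × List Int) => pvKeep lo hi ms p.2)
        (PySem.List.enumerate sn 0) = List.countP (pvKeep lo hi ms) sn := by
      conv_rhs => rw [← PySem.List.map_snd_enumerate sn 0]
      rw [List.countP_map]
      rfl
    exact h
  rw [hlen, hclen]

-- ===== VERDICT (by name: the statement is the Claim_ definition above) =====
theorem get_num_betasheet_spec : Claim_equal_get_num_betasheet := by
  intro dr sn ms _ hpre
  unfold Spec_get_num_betasheet
  unfold Pre_get_num_betasheet at hpre
  match dr, hpre with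
  | a :: b :: t, _ =>
    have h0 : PySem.List.pyGet? (a :: b :: t) 0 = some a := by simp
    have h1 : PySem.List.pyGet? (a :: b :: t) 1 = some b := by simp
    simp only [get_num_betasheet, get_num_betasheet_alt, h0, h1, Option.bind_some,
      Option.map_some, Option.getD_some]
    exact count_eq a b ms sn
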